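-- pv_equiv track=rewrite | github.com/Ryan-137/knowledge_graph | src/relation_extraction/dataset.py | _merge_dict_list_values
-- ===== SOURCE A (Python) =====
-- from collections import Counter, defaultdict
--
-- def _merge_dict_list_values(first: dict[str, list[str]] | None, second: dict[str, list[str]] | None) -> dict[str, list[str]]:
--     merged: dict[str, set[str]] = defaultdict(set)
--     for payload in (first or {}, second or {}):
--         for key, values in payload.items():
--             normalized_key = str(key)
--             for value in values:
--                 if str(value):
--                     merged[normalized_key].add(str(value))
--     return {key: sorted(values) for key, values in sorted(merged.items())}
-- ===== SOURCE B (Python) =====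
-- from itertools import groupby
--
-- def _merge_dict_list_values(first, second):
--     pairs = []
--     for payload in (first or {}, second or {}):
--         for key, values in payload.items():
--             k = str(key)
--             for value in values:
--                 v = str(value)
--                 if v:
--                     pairs.append((k, v))
--     pairs.sort()
--     result = {}
--     for key, group in groupby(pairs, key=lambda p: p[0]):
--         vals = []
--         for _, v in group:
--             if not vals or vals[-1] != v:
--                 vals.append(v)
--         result[key] = vals
--     return result
-- ===== Notes on version B (the rewrite author's own statement) =====
-- stated objective: alternative
-- what changed: Replaces A's defaultdict-of-sets accumulation followed by sorting keys and each value set with a single flatten of both payloads into (key, value) pairs, one lexicographic sort, and one groupby-style pass that emits each key group with consecutive duplicates dropped.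
import Mathlib
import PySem

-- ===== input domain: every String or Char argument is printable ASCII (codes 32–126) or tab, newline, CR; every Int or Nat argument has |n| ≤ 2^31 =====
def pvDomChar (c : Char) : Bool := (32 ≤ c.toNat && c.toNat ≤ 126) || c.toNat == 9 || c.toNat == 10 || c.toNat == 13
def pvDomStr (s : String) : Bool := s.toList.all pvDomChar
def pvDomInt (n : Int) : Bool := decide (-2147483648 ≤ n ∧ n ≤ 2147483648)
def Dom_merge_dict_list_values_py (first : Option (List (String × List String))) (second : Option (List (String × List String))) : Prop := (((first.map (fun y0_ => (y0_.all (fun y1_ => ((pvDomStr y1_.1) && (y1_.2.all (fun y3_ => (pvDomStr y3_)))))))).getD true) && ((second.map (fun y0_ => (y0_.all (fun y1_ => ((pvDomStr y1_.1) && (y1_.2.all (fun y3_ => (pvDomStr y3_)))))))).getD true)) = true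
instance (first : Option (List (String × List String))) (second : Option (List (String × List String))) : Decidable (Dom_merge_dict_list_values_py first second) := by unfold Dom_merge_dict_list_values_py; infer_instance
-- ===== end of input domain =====

-- B replaces A's defaultdict-of-sets accumulation (then sort keys, sort each value set) by
-- flatten-into-pairs + one lexicographic sort + one groupby pass with consecutive dedup
-- (objective: alternative; same asymptotic cost).


-- ===== PORT A =====
-- str(key)/str(value) on str arguments is the identity; `if str(value)` is the nonempty test.
-- Python's sorted(merged.items()) compares the key component first and the keys of a dict are
-- distinct, so the set components are never compared: key = fst is exact here.
def merge_dict_list_values_py (first : Option (List (String × List String))) (second : Option (List (String × List String))) : List (String × List String) :=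
  let merged : PySem.Dict String (PySem.Set String) :=
    [first.getD [], second.getD []].foldl
      (fun d payload => payload.foldl
        (fun d kv => kv.2.foldl
          (fun d v => if v ≠ "" then d.modify kv.1 PySem.Set.empty (fun s => PySem.Set.add s v) else d) d) d)
      PySem.Dict.empty
  (PySem.List.sorted merged.items (fun p => p.1) false).map
    (fun p => (p.1, PySem.List.sorted p.2 (fun v => v) false))

-- ===== PORT B =====
-- groupby over the sorted pair list; `vals == [] or vals[-1] != v` is the single test
-- `vals.getLast? ≠ some v` (getLast? of [] is none).
def pvGroups : List (String × String) → List (String × List String)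
  | [] => []
  | (k, v) :: rest =>
    (k, ((k, v) :: rest.takeWhile (fun p => p.1 == k)).foldl
        (fun vals p => if vals.getLast? ≠ some p.2 then vals ++ [p.2] else vals) [])
      :: pvGroups (rest.dropWhile (fun p => p.1 == k))
  termination_by l => l.length
  decreasing_by
    simp only [List.length_cons]
    exact Nat.lt_succ_of_le (List.length_dropWhile_le _ _)

def merge_dict_list_values_py_alt (first : Option (List (String × List String))) (second : Option (List (String × List String))) : List (String × List String) :=
  let pairs : List (String × String) :=
    [first.getD [], second.getD []].foldl
      (fun l payload => payload.foldl
        (fun l kv => kv.2.foldl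
          (fun l v => if v ≠ "" then l ++ [(kv.1, v)] else l) l) l)
      []
  pvGroups (PySem.List.sorted2 pairs (fun p => p.1) (fun p => p.2) false)

-- ===== PRECONDITION & SPEC =====
-- Pre_ excludes association lists in which a payload repeats a key: such a list does not
-- represent a Python dict (whose keys are unique), so Python's A never receives it.
def Pre_merge_dict_list_values_py (first : Option (List (String × List String))) (second : Option (List (String × List String))) : Prop :=
  ((first.getD []).map Prod.fst).Nodup ∧ ((second.getD []).map Prod.fst).Nodup
instance (first : Option (List (String × List String))) (second : Option (List (String × List String))) : Decidable (Pre_merge_dict_list_values_py first second) := by unfold Pre_merge_dict_list_values_py; infer_instance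
def pvWitness_merge_dict_list_values_py : (Option (List (String × List String))) × (Option (List (String × List String))) :=
  (some [("b", ["y", "x", ""]), ("a", ["x"])], some [("a", ["z", "x"])])

def Spec_merge_dict_list_values_py (first : Option (List (String × List String))) (second : Option (List (String × List String))) (out : List (String × List String)) : Prop := out = merge_dict_list_values_py_alt first second
instance (first : Option (List (String × List String))) (second : Option (List (String × List String))) (out : List (String × List String)) : Decidable (Spec_merge_dict_list_values_py first second out) := by unfold Spec_merge_dict_list_values_py; infer_instance

-- ===== CLAIM (what is proved, stated in full; the proofs are below) =====
def Claim_equal_merge_dict_list_values_py : Prop := ∀ (first : Option (List (String × List String))) (second : Option (List (String × List String))), Dom_merge_dict_list_values_py first second → Pre_merge_dict_list_values_py first second → Spec_merge_dict_list_values_py first second (merge_dict_list_values_py first second)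

-- ===== LEMMAS AND PROOFS =====

-- the filtered (key, value) pair list a payload contributes
def pvF (kv : String × List String) : List (String × String) :=
  (kv.2.filter (fun v => decide (v ≠ ""))).map (fun v => (kv.1, v))

def pvStep (d : PySem.Dict String (PySem.Set String)) (q : String × String) : PySem.Dict String (PySem.Set String) :=
  d.modify q.1 PySem.Set.empty (fun s => PySem.Set.add s q.2)
-- the canonical result both programs compute, phrased over the flattened pair list
def pvCanon (ps : List (String × String)) : List (String × List String) :=
  (PySem.List.sorted (PySem.Set.ofList (ps.map Prod.fst)) (fun x => x) false).map
    (fun k => (k, PySem.List.sorted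
        (PySem.Set.ofList ((ps.filter (fun p => p.1 == k)).map Prod.snd)) (fun x => x) false))

-- the (non-strict) lexicographic order on pairs that pairs.sort() realises
def pvL (a b : String × String) : Prop := a.1 < b.1 ∨ (a.1 = b.1 ∧ a.2 ≤ b.2)

-- equal strictly increasing lists: same membership implies equality
theorem pv_eq_of_pairwise_lt (l₁ l₂ : List String)
    (h₁ : l₁.Pairwise (· < ·)) (h₂ : l₂.Pairwise (· < ·))
    (hm : ∀ x, x ∈ l₁ ↔ x ∈ l₂) : l₁ = l₂ := by
  have n₁ : l₁.Nodup := h₁.imp (fun h => ne_of_lt h)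
  have n₂ : l₂.Nodup := h₂.imp (fun h => ne_of_lt h)
  have hp : l₁.Perm l₂ := (List.perm_ext_iff_of_nodup n₁ n₂).2 hm
  exact hp.eq_of_pairwise (fun a b _ _ hab hba => absurd hba (lt_asymm hab)) h₁ h₂

-- === A-side: the dict accumulation characterised ===
theorem pv_payload_fold (payload : List (String × List String)) (d : PySem.Dict String (PySem.Set String)) :
    payload.foldl (fun d kv => kv.2.foldl
      (fun d v => if v ≠ "" then d.modify kv.1 PySem.Set.empty (fun s => PySem.Set.add s v) else d) d) d
    = (payload.flatMap pvF).foldl pvStep d := by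
  have h : payload.foldl (fun d kv => kv.2.foldl
      (fun d v => if v ≠ "" then d.modify kv.1 PySem.Set.empty (fun s => PySem.Set.add s v) else d) d) d
      = payload.foldl (fun d kv => (pvF kv).foldl pvStep d) d := by
    apply PySem.List.foldl_congr_mem
    intro acc kv _
    rw [PySem.List.foldl_ite_eq_foldl_filter (p := fun v => v ≠ "")]
    rw [pvF, List.foldl_map]
    rfl
  rw [h]
  exact Eq.symm List.foldl_flatMap

theorem pv_getD_fold (l : List (String × String)) : ∀ (d : PySem.Dict String (PySem.Set String)) (k : String),
    (l.foldl pvStep d).getD k PySem.Set.empty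
      = PySem.Set.update (d.getD k PySem.Set.empty) ((l.filter (fun p => p.1 == k)).map Prod.snd) := by
  induction l with
  | nil => intro d k; simp [PySem.Set.update_nil]
  | cons q t ih =>
    intro d k
    rw [List.foldl_cons, ih]
    by_cases hk : q.1 = k
    · subst hk
      simp only [List.filter_cons, beq_self_eq_true, if_pos, List.map_cons, PySem.Set.update_cons]
      rw [pvStep, PySem.Dict.getD_modify]
      simp
    · have hbeq : (q.1 == k) = false := beq_eq_false_iff_ne.2 hk
      simp only [List.filter_cons, hbeq]
      rw [pvStep, PySem.Dict.getD_modify]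
      simp [Ne.symm hk]

theorem pv_items_eq {ν : Type} (d0 : ν) : ∀ (l : List (String × ν)), (l.map Prod.fst).Nodup →
    l = (l.map Prod.fst).map (fun k => (k, (PySem.Dict.mk l).getD k d0)) := by
  intro l
  induction l with
  | nil => intro; rfl
  | cons q t ih =>
    intro h
    rw [List.map_cons, List.nodup_cons] at h
    obtain ⟨hq, ht⟩ := h
    simp only [List.map_cons]
    congr 1
    · rw [PySem.Dict.getD_eq_get?_getD]
      cases q with | mk k v =>
      rw [PySem.Dict.get?_mk_cons]
      simp
    · conv_lhs => rw [ih ht]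
      apply List.map_congr_left
      intro k hk
      have hne : ¬ (q.1 == k) = true := by
        simp only [beq_iff_eq]
        intro he; exact hq (he ▸ hk)
      congr 1
      rw [PySem.Dict.getD_eq_get?_getD, PySem.Dict.getD_eq_get?_getD]
      cases q with | mk k' v =>
      rw [PySem.Dict.get?_mk_cons]
      have hne2 : k' ≠ k := by simpa using hne
      simp [hne2]

theorem pv_sorted_map (xs : List String) (g : String → String × List String) (hg : ∀ k, (g k).1 = k) :
    PySem.List.sorted ((PySem.Set.ofList xs).map g) (fun p => p.1) false
      = (PySem.List.sorted (PySem.Set.ofList xs) (fun x => x) false).map g := by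
  apply PySem.List.sorted_eq_of_perm_of_pairwise_lt
  · exact (PySem.List.sorted_perm _ _ _).map g
  · refine (List.pairwise_map).2 ?_
    exact (PySem.List.sorted_ofList_pairwise_lt xs).imp (fun {a b} h => by simpa [hg] using h)

theorem pvA_eq_canon (first second : Option (List (String × List String))) :
    merge_dict_list_values_py first second
      = pvCanon (((first.getD []).flatMap pvF) ++ ((second.getD []).flatMap pvF)) := by
  unfold merge_dict_list_values_py
  simp only [List.foldl_cons, List.foldl_nil]
  rw [pv_payload_fold, pv_payload_fold, ← List.foldl_append]
  set ps := ((first.getD []).flatMap pvF) ++ ((second.getD []).flatMap pvF) with hps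
  set D := ps.foldl pvStep PySem.Dict.empty with hD
  have hkeys : D.keys = PySem.Set.ofList (ps.map Prod.fst) := by
    have h := PySem.Dict.keys_foldl_modify_key ps (fun q : String × String => q.1)
      PySem.Set.empty (fun _ q => fun s => PySem.Set.add s q.2) PySem.Dict.empty
    rw [hD]
    show (ps.foldl (fun d q => d.modify q.1 PySem.Set.empty (fun s => PySem.Set.add s q.2)) PySem.Dict.empty).keys = _
    rw [h, PySem.Dict.keys_empty, PySem.Set.update_nil_left]
  have hgetD : ∀ k, D.getD k PySem.Set.empty
      = PySem.Set.ofList ((ps.filter (fun p => p.1 == k)).map Prod.snd) := by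
    intro k
    rw [hD, pv_getD_fold, PySem.Dict.getD_empty, PySem.Set.update_empty]
  have hnodup : (D.items.map Prod.fst).Nodup := by
    show D.keys.Nodup
    rw [hkeys]; exact PySem.Set.nodup_ofList _
  have hitems : D.items = (PySem.Set.ofList (ps.map Prod.fst)).map
      (fun k => (k, D.getD k PySem.Set.empty)) := by
    conv_lhs => rw [pv_items_eq PySem.Set.empty D.items hnodup]
    rw [← hkeys]
    rfl
  rw [hitems, pv_sorted_map _ _ (fun k => rfl), pvCanon, List.map_map]
  apply List.map_congr_left
  intro k _
  simp only [Function.comp]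
  rw [hgetD k]

-- === B-side: sortedness of the sorted pair list ===
theorem pv_insertBy_nil {α : Type} (before : α → α → Bool) (x : α) :
    PySem.List.insertBy before x [] = [x] := rfl

theorem pv_insertBy_cons {α : Type} (before : α → α → Bool) (x y : α) (ys : List α) :
    PySem.List.insertBy before x (y :: ys)
      = if before x y then x :: y :: ys else y :: PySem.List.insertBy before x ys := rfl

theorem pv_pairwise_insertBy {α : Type} (before : α → α → Bool) (R : α → α → Prop)
    (htrans : ∀ {a b c}, R a b → R b c → R a c)
    (h1 : ∀ a b, before a b = true → R a b) (h2 : ∀ a b, before a b = false → R b a)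
    (x : α) : ∀ (l : List α), l.Pairwise R → (PySem.List.insertBy before x l).Pairwise R := by
  intro l
  induction l with
  | nil => intro _; rw [pv_insertBy_nil]; simp
  | cons y ys ih =>
    intro hl
    rw [List.pairwise_cons] at hl
    obtain ⟨hy, hys⟩ := hl
    rw [pv_insertBy_cons]
    by_cases hb : before x y = true
    · rw [if_pos hb]
      refine List.pairwise_cons.2 ⟨?_, List.pairwise_cons.2 ⟨hy, hys⟩⟩
      intro z hz
      rcases List.mem_cons.1 hz with rfl | hz'
      · exact h1 _ _ hb
      · exact htrans (h1 _ _ hb) (hy _ hz')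
    · rw [if_neg hb]
      refine List.pairwise_cons.2 ⟨?_, ih hys⟩
      intro z hz
      rcases (PySem.List.mem_insertBy _ _ _ _).1 hz with rfl | hz'
      · exact h2 _ _ (Bool.not_eq_true _ ▸ hb)
      · exact hy _ hz'

theorem pv_sorted2_pairwise (ps : List (String × String)) :
    (PySem.List.sorted2 ps (fun p => p.1) (fun p => p.2) false).Pairwise pvL := by
  unfold PySem.List.sorted2
  simp only []
  have step : ∀ (l : List (String × String)), l.Pairwise pvL →
      ∀ (xs : List (String × String)),
      (xs.foldl (fun acc x => PySem.List.insertBy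
        (fun a b => decide (a.1 < b.1) || !decide (b.1 < a.1) && decide (a.2 < b.2)) x acc) l).Pairwise pvL := by
    intro l hl xs
    induction xs generalizing l with
    | nil => exact hl
    | cons x xs ih =>
      rw [List.foldl_cons]
      refine ih _ ?_
      refine pv_pairwise_insertBy _ pvL ?_ ?_ ?_ x l hl
      · intro a b c hab hbc
        rcases hab with h | ⟨he, h2'⟩ <;> rcases hbc with h' | ⟨he', h2''⟩
        · exact Or.inl (lt_trans h h')
        · exact Or.inl (he' ▸ h)
        · exact Or.inl (he ▸ h')
        · exact Or.inr ⟨he.trans he', le_trans h2' h2''⟩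
      · intro a b h
        rw [Bool.or_eq_true] at h
        rcases h with h | h
        · exact Or.inl (of_decide_eq_true h)
        · rw [Bool.and_eq_true] at h
          obtain ⟨h1', h2'⟩ := h
          have hnb : ¬ b.1 < a.1 := of_decide_eq_false (by simpa using h1')
          rcases eq_or_lt_of_le (not_lt.1 hnb) with he | hlt
          · exact Or.inr ⟨he, le_of_lt (of_decide_eq_true h2')⟩
          · exact Or.inl hlt
      · intro a b h
        rw [Bool.or_eq_false_iff, Bool.and_eq_false_iff] at h
        obtain ⟨ha, hb⟩ := h
        have h1 : ¬ a.1 < b.1 := of_decide_eq_false ha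
        rcases hb with hb | hb
        · exact Or.inl (of_decide_eq_true (by simpa using hb))
        · have h2 : ¬ a.2 < b.2 := of_decide_eq_false hb
          rcases eq_or_lt_of_le (not_lt.1 h1) with he | hlt
          · exact Or.inr ⟨he, not_lt.1 h2⟩
          · exact Or.inl hlt
  exact step [] (List.Pairwise.nil) ps


-- === B-side: the dedup fold and the groupby pass ===
theorem pv_last_le : ∀ (l : List String) (m : String), l.Pairwise (· < ·) →
    l.getLast? = some m → ∀ a ∈ l, a ≤ m := by
  intro l
  induction l with
  | nil => intro m _ h; simp at h
  | cons x t ih =>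
    intro m hpw hlast a ha
    rw [List.pairwise_cons] at hpw
    obtain ⟨hx, ht⟩ := hpw
    cases t with
    | nil =>
      simp at hlast ha
      subst hlast; subst ha; exact le_refl _
    | cons y s =>
      rw [List.getLast?_cons_cons] at hlast
      have hm : m ∈ y :: s := List.mem_of_getLast? hlast
      rcases List.mem_cons.1 ha with rfl | ha'
      · exact le_of_lt (hx _ hm)
      · exact ih m ht hlast a ha'

-- the consecutive-dedup fold: invariant
theorem pv_dedup_inv : ∀ (vs acc : List String), vs.Pairwise (· ≤ ·) → acc.Pairwise (· < ·) →
    (∀ a ∈ acc, ∀ v ∈ vs, a ≤ v) →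
    (vs.foldl (fun vals v => if vals.getLast? ≠ some v then vals ++ [v] else vals) acc).Pairwise (· < ·)
    ∧ (∀ x, x ∈ vs.foldl (fun vals v => if vals.getLast? ≠ some v then vals ++ [v] else vals) acc
          ↔ x ∈ acc ∨ x ∈ vs) := by
  intro vs
  induction vs with
  | nil => intro acc _ hacc _; exact ⟨hacc, by simp⟩
  | cons v t ih =>
    intro acc hvs hacc hband
    rw [List.pairwise_cons] at hvs
    obtain ⟨hv, ht⟩ := hvs
    rw [List.foldl_cons]
    by_cases hlast : acc.getLast? = some v
    · rw [if_neg (by simpa using hlast)]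
      have hvmem : v ∈ acc := List.mem_of_getLast? hlast
      have := ih acc ht hacc (fun a ha w hw => le_trans (hband a ha v (List.mem_cons_self)) (hv w hw))
      refine ⟨this.1, fun x => ?_⟩
      rw [this.2 x]
      constructor
      · rintro (h | h)
        · exact Or.inl h
        · exact Or.inr (List.mem_cons_of_mem _ h)
      · rintro (h | h)
        · exact Or.inl h
        · rcases List.mem_cons.1 h with rfl | h'
          · exact Or.inl hvmem
          · exact Or.inr h'
    · rw [if_pos (by simpa using hlast)]
      have hlt : ∀ a ∈ acc, a < v := by
        intro a ha
        cases hm : acc.getLast? with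
        | none => simp [List.getLast?_eq_none_iff] at hm; subst hm; simp at ha
        | some m =>
          have hma : a ≤ m := pv_last_le acc m hacc hm a ha
          have hmv : m ≤ v := hband m (List.mem_of_getLast? hm) v (List.mem_cons_self)
          have : m ≠ v := fun he => hlast (he ▸ hm)
          exact lt_of_le_of_lt hma (lt_of_le_of_ne hmv this)
      have hpw' : (acc ++ [v]).Pairwise (· < ·) := by
        rw [List.pairwise_append]
        exact ⟨hacc, List.pairwise_singleton _ _, fun a ha b hb => by
          rw [List.mem_singleton] at hb; subst hb; exact hlt a ha⟩
      have hband' : ∀ a ∈ acc ++ [v], ∀ w ∈ t, a ≤ w := by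
        intro a ha w hw
        rcases List.mem_append.1 ha with ha' | ha'
        · exact le_trans (hband a ha' v (List.mem_cons_self)) (hv w hw)
        · rw [List.mem_singleton] at ha'; subst ha'; exact hv w hw
      have := ih (acc ++ [v]) ht hpw' hband'
      refine ⟨this.1, fun x => ?_⟩
      rw [this.2 x]
      simp only [List.mem_append, List.mem_cons]
      tauto

-- consecutive dedup of a weakly increasing list = sorted(set(vs))
theorem pv_dedup_eq (vs : List String) (h : vs.Pairwise (· ≤ ·)) :
    vs.foldl (fun vals v => if vals.getLast? ≠ some v then vals ++ [v] else vals) []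
      = PySem.List.sorted (PySem.Set.ofList vs) (fun x => x) false := by
  obtain ⟨hpw, hmem⟩ := pv_dedup_inv vs [] h List.Pairwise.nil (by simp)
  refine pv_eq_of_pairwise_lt _ _ hpw (PySem.List.sorted_ofList_pairwise_lt vs) ?_
  intro x
  rw [hmem x, PySem.List.mem_sorted, PySem.Set.mem_ofList]
  simp

theorem pv_dropWhile_head {α : Type} (p : α → Bool) :
    ∀ (l : List α) (a : α) (t : List α), l.dropWhile p = a :: t → p a = false := by
  intro l
  induction l with
  | nil => intro a t h; simp at h
  | cons x xs ih =>
    intro a t h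
    rw [List.dropWhile_cons] at h
    by_cases hx : p x = true
    · rw [if_pos hx] at h; exact ih a t h
    · rw [if_neg hx] at h; cases h; simpa using hx

-- the groupby pass over a lexicographically ordered pair list computes pvCanon
theorem pv_groups_eq : ∀ (n : Nat) (qs : List (String × String)), qs.length ≤ n →
    qs.Pairwise pvL → pvGroups qs = pvCanon qs := by
  intro n
  induction n with
  | zero =>
    intro qs hlen _
    rw [List.length_eq_zero_iff.1 (Nat.le_zero.1 hlen)]
    rw [pvGroups]
    rfl
  | succ n ih =>
    intro qs hlen hpw
    match qs with
    | [] => rw [pvGroups]; rfl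
    | (k, v) :: rest =>
      rw [List.pairwise_cons] at hpw
      obtain ⟨hhead, hrest⟩ := hpw
      set run := rest.takeWhile (fun p => p.1 == k) with hrun_def
      set rest' := rest.dropWhile (fun p => p.1 == k) with hrest'_def
      have hsplit : run ++ rest' = rest := List.takeWhile_append_dropWhile
      have hrunk : ∀ p ∈ run, p.1 = k := by
        intro p hp
        have := List.mem_takeWhile_imp hp
        simpa using this
      have hrest'pw : rest'.Pairwise pvL := hrest.sublist (List.dropWhile_sublist _)
      have hgt : ∀ p ∈ rest', k < p.1 := by
        cases hr : rest' with
        | nil => simp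
        | cons h0 t0 =>
          have hh0 : (h0.1 == k) = false := pv_dropWhile_head _ rest h0 t0 (hrest'_def ▸ hr)
          have hh0ne : h0.1 ≠ k := by simpa using hh0
          have hh0mem : h0 ∈ rest := by
            rw [← hsplit, hr]; exact List.mem_append_right _ List.mem_cons_self
          have hkh0 : k ≤ h0.1 := by
            rcases hhead h0 hh0mem with h | ⟨he, _⟩
            · exact le_of_lt h
            · exact le_of_eq he
          have hkh0' : k < h0.1 := lt_of_le_of_ne hkh0 (Ne.symm hh0ne)
          intro p hp
          rcases List.mem_cons.1 hp with rfl | hp'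
          · exact hkh0'
          · have hpw2 : (h0 :: t0).Pairwise pvL := hr ▸ hrest'pw
            rcases (List.pairwise_cons.1 hpw2).1 p hp' with h | ⟨he, _⟩
            · exact lt_trans hkh0' h
            · exact he ▸ hkh0'
      -- the filter of qs at key k is exactly the head run
      have hfilter_k : (((k, v) :: rest).filter (fun p => p.1 == k)) = (k, v) :: run := by
        rw [← hsplit]
        rw [List.filter_cons]
        simp only [beq_self_eq_true, if_pos]
        congr 1
        rw [List.filter_append]
        have h1 : run.filter (fun p => p.1 == k) = run :=
          List.filter_eq_self.2 (fun p hp => by simp [hrunk p hp])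
        have h2 : rest'.filter (fun p => p.1 == k) = [] :=
          List.filter_eq_nil_iff.2 (fun p hp => by simp [ne_of_gt (hgt p hp)])
        rw [h1, h2, List.append_nil]
      -- the sorted distinct keys of qs = k :: sorted distinct keys of rest'
      have hkeys : PySem.List.sorted (PySem.Set.ofList (((k, v) :: rest).map Prod.fst)) (fun x => x) false
          = k :: PySem.List.sorted (PySem.Set.ofList (rest'.map Prod.fst)) (fun x => x) false := by
        apply pv_eq_of_pairwise_lt
        · exact PySem.List.sorted_ofList_pairwise_lt _
        · rw [List.pairwise_cons]
          refine ⟨?_, PySem.List.sorted_ofList_pairwise_lt _⟩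
          intro x hx
          rw [PySem.List.mem_sorted, PySem.Set.mem_ofList, List.mem_map] at hx
          obtain ⟨p, hp, rfl⟩ := hx
          exact hgt p hp
        · intro x
          rw [PySem.List.mem_sorted, PySem.Set.mem_ofList, List.mem_cons,
            PySem.List.mem_sorted, PySem.Set.mem_ofList]
          simp only [List.map_cons, List.mem_cons, ← hsplit, List.map_append, List.mem_append]
          constructor
          · rintro (h | h | h)
            · exact Or.inl h
            · rw [List.mem_map] at h
              obtain ⟨p, hp, rfl⟩ := h
              exact Or.inl (hrunk p hp)
            · exact Or.inr h
          · rintro (h | h)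
            · exact Or.inl h
            · exact Or.inr (Or.inr h)
      -- the head group's value list
      have hvals : ((k, v) :: run).foldl
            (fun vals p => if vals.getLast? ≠ some p.2 then vals ++ [p.2] else vals) []
          = PySem.List.sorted (PySem.Set.ofList (((k, v) :: run).map Prod.snd)) (fun x => x) false := by
        rw [← List.foldl_map (f := Prod.snd)
          (g := fun vals v => if vals.getLast? ≠ some v then vals ++ [v] else vals)]
        apply pv_dedup_eq
        have hsub : ((k, v) :: run).Sublist ((k, v) :: rest) :=
          List.Sublist.cons₂ _ (List.takeWhile_sublist _)
        have hpw2 : ((k, v) :: run).Pairwise pvL :=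
          (List.pairwise_cons.2 ⟨hhead, hrest⟩).sublist hsub
        refine List.pairwise_map.2 (hpw2.imp_of_mem ?_)
        intro a b ha hb hab
        have hak : a.1 = k := by
          rcases List.mem_cons.1 ha with rfl | h
          · rfl
          · exact hrunk a h
        have hbk : b.1 = k := by
          rcases List.mem_cons.1 hb with rfl | h
          · rfl
          · exact hrunk b h
        rcases hab with h | ⟨_, h⟩
        · rw [hak, hbk] at h
          exact absurd h (lt_irrefl k)
        · exact h
      -- put the pieces together
      have hG : pvGroups ((k, v) :: rest)
          = (k, ((k, v) :: run).foldl
              (fun vals p => if vals.getLast? ≠ some p.2 then vals ++ [p.2] else vals) [])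
            :: pvGroups rest' := by
        rw [pvGroups]
      rw [hG]
      have hrec : pvGroups rest' = pvCanon rest' := by
        refine ih rest' ?_ hrest'pw
        have h1 : rest'.length ≤ rest.length := List.length_dropWhile_le _ _
        have h2 : ((k, v) :: rest).length ≤ n + 1 := hlen
        simp only [List.length_cons] at h2
        omega
      conv_rhs => rw [pvCanon, hkeys, List.map_cons]
      congr 1
      · rw [hvals, hfilter_k]
      · rw [hrec, pvCanon]
        apply List.map_congr_left
        intro k' hk'
        have hk'mem : k' ∈ rest'.map Prod.fst := by
          rw [PySem.List.mem_sorted, PySem.Set.mem_ofList] at hk'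
          exact hk'
        have hkk' : k < k' := by
          rw [List.mem_map] at hk'mem
          obtain ⟨p, hp, rfl⟩ := hk'mem
          exact hgt p hp
        have hfe : (((k, v) :: rest).filter (fun p => p.1 == k')) = rest'.filter (fun p => p.1 == k') := by
          rw [← hsplit, List.filter_cons]
          have hne : ¬ ((k, v).1 == k') = true := by simp [ne_of_lt hkk']
          rw [if_neg hne, List.filter_append]
          have h1 : run.filter (fun p => p.1 == k') = [] :=
            List.filter_eq_nil_iff.2 (fun p hp => by
              simp [hrunk p hp, ne_of_lt hkk'])
          rw [h1, List.nil_append]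
        rw [hfe]


theorem pv_canon_perm (qs ps : List (String × String)) (h : qs.Perm ps) :
    pvCanon qs = pvCanon ps := by
  have hkeys : PySem.List.sorted (PySem.Set.ofList (qs.map Prod.fst)) (fun x => x) false
      = PySem.List.sorted (PySem.Set.ofList (ps.map Prod.fst)) (fun x => x) false := by
    apply pv_eq_of_pairwise_lt _ _ (PySem.List.sorted_ofList_pairwise_lt _)
      (PySem.List.sorted_ofList_pairwise_lt _)
    intro x
    rw [PySem.List.mem_sorted, PySem.Set.mem_ofList, PySem.List.mem_sorted, PySem.Set.mem_ofList]
    exact (h.map Prod.fst).mem_iff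
  rw [pvCanon, pvCanon, hkeys]
  apply List.map_congr_left
  intro k _
  have hvals : PySem.List.sorted (PySem.Set.ofList ((qs.filter (fun p => p.1 == k)).map Prod.snd)) (fun x => x) false
      = PySem.List.sorted (PySem.Set.ofList ((ps.filter (fun p => p.1 == k)).map Prod.snd)) (fun x => x) false := by
    apply pv_eq_of_pairwise_lt _ _ (PySem.List.sorted_ofList_pairwise_lt _)
      (PySem.List.sorted_ofList_pairwise_lt _)
    intro x
    rw [PySem.List.mem_sorted, PySem.Set.mem_ofList, PySem.List.mem_sorted, PySem.Set.mem_ofList]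
    exact ((h.filter _).map Prod.snd).mem_iff
  rw [hvals]

theorem pv_pairs_fold (payload : List (String × List String)) (l : List (String × String)) :
    payload.foldl (fun l kv => kv.2.foldl
      (fun l v => if v ≠ "" then l ++ [(kv.1, v)] else l) l) l
    = l ++ payload.flatMap pvF := by
  have h : payload.foldl (fun l kv => kv.2.foldl
      (fun l v => if v ≠ "" then l ++ [(kv.1, v)] else l) l) l
      = payload.foldl (fun l kv => l ++ pvF kv) l := by
    apply PySem.List.foldl_congr_mem
    intro acc kv _
    rw [PySem.List.foldl_append_ite (p := fun v => v ≠ "") (f := fun v => (kv.1, v))]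
    rfl
  rw [h, PySem.List.foldl_append_eq_flatMap]

theorem pvB_eq_canon (first second : Option (List (String × List String))) :
    merge_dict_list_values_py_alt first second
      = pvCanon (((first.getD []).flatMap pvF) ++ ((second.getD []).flatMap pvF)) := by
  unfold merge_dict_list_values_py_alt
  simp only [List.foldl_cons, List.foldl_nil]
  rw [pv_pairs_fold, pv_pairs_fold, List.nil_append]
  set ps := ((first.getD []).flatMap pvF) ++ ((second.getD []).flatMap pvF) with hps
  rw [pv_groups_eq (PySem.List.sorted2 ps (fun p => p.1) (fun p => p.2) false).length _
    (le_refl _) (pv_sorted2_pairwise ps)]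
  exact pv_canon_perm _ _ (PySem.List.sorted2_perm ps _ _ _)

-- ===== VERDICT (by name: the statement is the Claim_ definition above) =====
theorem merge_dict_list_values_py_spec : Claim_equal_merge_dict_list_values_py := by
  intro first second _ _
  show _ = _
  rw [pvA_eq_canon, pvB_eq_canon]
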